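-- pv_equiv track=rewrite | github.com/buddhave-amd/Sw_scripts | md5_compare/functionality_run.py | CheckDoubleQuoteInsideSingleQuote
-- ===== SOURCE A (Python) =====
-- def CheckDoubleQuoteInsideSingleQuote(command):
--     # Define the regular expression to match single quotes inside double quotes
--     stack = []
--     for i in command:
--         if i == '"':
--             if not stack:
--                 stack.append(i)
--             else:
--                 stack.pop()
--         if i == "'":
--             if stack:
--                 return True
--     return False
-- ===== SOURCE B (Python) =====
-- def CheckDoubleQuoteInsideSingleQuote(command):
--     # Split on '"': segments at odd indices are exactly the regions inside double quotes.
--     parts = command.split('"')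
--     return any(i % 2 == 1 and "'" in seg for i, seg in enumerate(parts))
-- ===== Notes on version B (the rewrite author's own statement) =====
-- stated objective: faster
-- what changed: Replaces the character-by-character stack state machine with a split-then-scan decomposition: B splits the command on the double-quote character, so the odd-indexed segments are exactly the inside-quotes regions, and returns whether any of them contains a single quote.
import Mathlib
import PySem

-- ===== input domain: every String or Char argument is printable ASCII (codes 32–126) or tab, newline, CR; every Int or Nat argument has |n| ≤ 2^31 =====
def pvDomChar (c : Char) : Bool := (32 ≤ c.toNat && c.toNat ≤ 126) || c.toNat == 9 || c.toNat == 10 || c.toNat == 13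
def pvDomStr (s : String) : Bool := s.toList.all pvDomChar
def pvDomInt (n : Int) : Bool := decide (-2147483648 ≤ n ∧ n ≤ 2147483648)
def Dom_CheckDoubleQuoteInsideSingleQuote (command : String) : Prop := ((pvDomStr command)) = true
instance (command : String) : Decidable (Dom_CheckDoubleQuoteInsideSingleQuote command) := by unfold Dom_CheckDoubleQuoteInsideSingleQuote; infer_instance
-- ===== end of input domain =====

-- B replaces A's per-character stack state machine by split-on-double-quote then scan the odd-indexed (inside) segments; same O(n), measured faster by constant factor (C-level split).

-- ===== PORT A =====
-- the loop: stack toggles on '"' (push when empty, pop otherwise); return True on a '\'' seen with nonempty stack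
def pvGoA : List Char → List Char → Bool
  | [], _ => false
  | i :: rest, stack =>
    let stack1 := if i == '"' then (if stack.isEmpty then stack ++ [i] else stack.dropLast) else stack
    if i == '\'' && !stack1.isEmpty then true else pvGoA rest stack1

def CheckDoubleQuoteInsideSingleQuote (command : String) : Bool :=
  pvGoA command.toList []

-- ===== PORT B =====
def CheckDoubleQuoteInsideSingleQuote_alt (command : String) : Bool :=
  let parts := PySem.Chars.splitOn command.toList ['"']
  parts.zipIdx.any (fun p => p.2 % 2 == 1 && PySem.Chars.isIn ['\''] p.1)

-- ===== PRECONDITION & SPEC =====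
def Spec_CheckDoubleQuoteInsideSingleQuote (command : String) (out : Bool) : Prop := out = CheckDoubleQuoteInsideSingleQuote_alt command
instance (command : String) (out : Bool) : Decidable (Spec_CheckDoubleQuoteInsideSingleQuote command out) := by unfold Spec_CheckDoubleQuoteInsideSingleQuote; infer_instance

-- ===== CLAIM (what is proved, stated in full; the proofs are below) =====
def Claim_equal_CheckDoubleQuoteInsideSingleQuote : Prop := ∀ (command : String), Dom_CheckDoubleQuoteInsideSingleQuote command → Spec_CheckDoubleQuoteInsideSingleQuote command (CheckDoubleQuoteInsideSingleQuote command)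

-- ===== LEMMAS AND PROOFS =====

theorem pvModifyHead_fun_id {α : Type} (l : List α) : List.modifyHead (fun x => x) l = l := by
  cases l <;> simp

theorem pvIsIn_singleton (a : Char) (s : List Char) : PySem.Chars.isIn [a] s = s.contains a := by
  rw [Bool.eq_iff_iff]
  simp [PySem.Chars.isIn_iff_infix, List.singleton_infix_iff]

-- alternating scan over the split segments: is there a '\'' in a segment at (inside ? even : odd) offset
def pvAlt : Bool → List (List Char) → Bool
  | _, [] => false
  | inside, s :: rest => (inside && PySem.Chars.isIn ['\''] s) || pvAlt (!inside) rest

theorem pvGo_spec (c : Char) : ∀ (fuel : Nat) (l cur : List Char) (acc : List (List Char)) (_ : l.length < fuel),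
    PySem.Chars.splitOn.go [c] fuel l cur acc
      = acc.reverse ++ (List.splitOnP (· == c) l).modifyHead (cur.reverse ++ ·) := by
  intro fuel
  induction fuel with
  | zero => intro l cur acc h; omega
  | succ n ih =>
    intro l cur acc h
    cases l with
    | nil => simp [PySem.Chars.splitOn.go, List.splitOnP_nil]
    | cons c' rest =>
      by_cases hc : c = c'
      · subst hc
        simp only [PySem.Chars.splitOn.go, List.isPrefixOf, BEq.rfl, Bool.and_self,
          if_pos]
        have hdrop : List.drop [c].length (c :: rest) = rest := by simp
        rw [hdrop, ih rest [] (cur.reverse :: acc) (by simpa using Nat.lt_of_succ_lt_succ h)]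
        rw [List.splitOnP_cons]
        simp [pvModifyHead_fun_id]
      · have hb : (([c].isPrefixOf (c' :: rest)) = false) := by
          simp [List.isPrefixOf, hc]
        simp only [PySem.Chars.splitOn.go, hb, Bool.false_eq_true, if_false]
        rw [ih rest (c' :: cur) acc (by simpa using Nat.lt_of_succ_lt_succ h)]
        rw [List.splitOnP_cons]
        have hne : (c' == c) = false := by simp [beq_iff_eq]; exact fun e => hc e.symm
        simp only [hne, Bool.false_eq_true, if_false]
        rcases hsp : List.splitOnP (· == c) rest with _ | ⟨hd, tl⟩
        · exact absurd hsp (List.splitOnP_ne_nil _ _)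
        · simp

theorem pvSplitOn_bridge (cs : List Char) :
    PySem.Chars.splitOn cs ['"'] = List.splitOnP (· == '"') cs := by
  unfold PySem.Chars.splitOn
  rw [pvGo_spec '"' (cs.length + 1) cs [] [] (by omega)]
  simp [pvModifyHead_fun_id]

theorem pvZip_alt (parts : List (List Char)) : ∀ n : Nat,
    (parts.zipIdx n).any (fun p => p.2 % 2 == 1 && PySem.Chars.isIn ['\''] p.1)
      = pvAlt (n % 2 == 1) parts := by
  induction parts with
  | nil => intro n; simp [pvAlt]
  | cons s rest ih =>
    intro n
    have hpar : (((n + 1) % 2 == 1) : Bool) = !(n % 2 == 1) := by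
      rcases Nat.mod_two_eq_zero_or_one n with h | h <;> simp [Nat.add_mod, h]
    simp only [List.zipIdx_cons, List.any_cons, ih (n + 1), pvAlt, hpar]

theorem pvMain (cs : List Char) :
    pvGoA cs [] = pvAlt false (List.splitOnP (· == '"') cs)
      ∧ pvGoA cs ['"'] = pvAlt true (List.splitOnP (· == '"') cs) := by
  induction cs with
  | nil => simp [pvGoA, List.splitOnP_nil, pvAlt, pvIsIn_singleton]
  | cons c rest ih =>
    obtain ⟨ih0, ih1⟩ := ih
    by_cases hq : c = '"'
    · subst hq
      rw [List.splitOnP_cons]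
      simp only [BEq.rfl, if_pos]
      constructor
      · simp [pvGoA, pvAlt, ih1]
      · simp [pvGoA, pvAlt, ih0, pvIsIn_singleton]
    · have hqb : (c == '"') = false := by simp [hq]
      rw [List.splitOnP_cons]
      simp only [hqb, Bool.false_eq_true, if_false]
      rcases hsp : List.splitOnP (· == '"') rest with _ | ⟨hd, tl⟩
      · exact absurd hsp (List.splitOnP_ne_nil _ _)
      · rw [hsp] at ih0 ih1
        by_cases hs : c = '\''
        · subst hs
          constructor
          · simpa [pvGoA, pvAlt, hqb] using ih0
          · simp [pvGoA, pvAlt, pvIsIn_singleton]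
        · have hsb : (c == '\'') = false := by simp [hs]
          have hne : ('\'' == c) = false := by
            simp only [beq_eq_false_iff_ne, ne_eq]
            exact fun e => hs e.symm
          have hne' : '\'' ≠ c := fun e => hs e.symm
          have hin : PySem.Chars.isIn ['\''] (c :: hd) = PySem.Chars.isIn ['\''] hd := by
            simp [pvIsIn_singleton, hne']
          have e1 : pvGoA (c :: rest) [] = pvGoA rest [] := by simp [pvGoA, hqb, hsb]
          have e2 : pvGoA (c :: rest) ['"'] = pvGoA rest ['"'] := by simp [pvGoA, hqb, hsb]
          constructor
          · rw [e1, ih0]; simp [pvAlt, List.modifyHead_cons]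
          · rw [e2, ih1]; simp [pvAlt, List.modifyHead_cons, hin]

-- ===== VERDICT (by name: the statement is the Claim_ definition above) =====
theorem CheckDoubleQuoteInsideSingleQuote_spec : Claim_equal_CheckDoubleQuoteInsideSingleQuote := by
  intro command _
  unfold Spec_CheckDoubleQuoteInsideSingleQuote
  unfold CheckDoubleQuoteInsideSingleQuote CheckDoubleQuoteInsideSingleQuote_alt
  rw [pvSplitOn_bridge, pvZip_alt _ 0]
  have h0 : ((0 % 2 == 1) : Bool) = false := rfl
  rw [h0]
  exact (pvMain command.toList).1
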